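-- pv_equiv track=rewrite | github.com/niteeshaiml1/Python_Programs | revision/range+_sum_dig.py | range_sum_dif
-- ===== SOURCE A (Python) =====
-- def range_sum_dif(start,end):
--     sum=0
--     for i in range (start,end+1):
--         temp=i
--         while temp>0:
--             dig=temp%10
--             sum+=dig
--             temp//=10
--     return sum
-- ===== SOURCE B (Python) =====
-- def range_sum_dif(start, end):
--     # cumulative digit-sum: g(n) = sum of digit sums of 0..n-1, computed in O(log n)
--     def digsum(q):
--         return 0 if q <= 0 else q % 10 + digsum(q // 10)
--     def g(n):
--         if n <= 0:
--             return 0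
--         q, r = n // 10, n % 10
--         return 10 * g(q) + 45 * q + r * digsum(q) + r * (r - 1) // 2
--     lo = max(start, 0)
--     if end < lo:
--         return 0
--     return g(end + 1) - g(lo)
-- ===== Notes on version B (the rewrite author's own statement) =====
-- stated objective: faster
-- what changed: Replaces the per-number loop over range(start,end+1) with a closed-form cumulative digit-sum recursion g(n) (recursing on n//10), returning g(end+1)-g(max(start,0)).
import Mathlib
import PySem

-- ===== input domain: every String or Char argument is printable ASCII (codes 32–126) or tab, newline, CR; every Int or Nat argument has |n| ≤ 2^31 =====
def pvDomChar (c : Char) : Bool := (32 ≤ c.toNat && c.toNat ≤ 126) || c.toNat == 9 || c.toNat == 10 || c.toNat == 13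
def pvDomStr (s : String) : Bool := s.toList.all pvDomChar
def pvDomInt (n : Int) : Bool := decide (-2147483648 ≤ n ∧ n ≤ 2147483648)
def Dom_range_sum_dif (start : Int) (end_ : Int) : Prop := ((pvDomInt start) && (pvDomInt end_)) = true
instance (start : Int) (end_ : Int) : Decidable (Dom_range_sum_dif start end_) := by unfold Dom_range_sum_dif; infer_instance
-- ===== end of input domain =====

-- B replaces A's per-number digit loop by a logarithmic cumulative digit-sum recursion (faster, asymptotic).

-- ===== PORT A =====
-- A's inner 'while temp>0: sum += temp%10; temp //= 10' loop, with the running accumulator.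
def dsumLoop (sum : Int) (temp : Int) : Int :=
  if _h : 0 < temp then
    dsumLoop (sum + PySem.Int.mod temp 10) (PySem.Int.floordiv temp 10)
  else sum
termination_by temp.toNat
decreasing_by
  rw [PySem.Int.floordiv_eq_ediv_of_pos (by norm_num : (0:Int) < 10)]
  omega

def range_sum_dif (start : Int) (end_ : Int) : Int :=
  (PySem.List.pyRange start (end_ + 1) 1).foldl (fun sum i => dsumLoop sum i) 0

-- ===== PORT B =====
def digsum (q : Int) : Int :=
  if _h : q ≤ 0 then 0
  else PySem.Int.mod q 10 + digsum (PySem.Int.floordiv q 10)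
termination_by q.toNat
decreasing_by
  rw [PySem.Int.floordiv_eq_ediv_of_pos (by norm_num : (0:Int) < 10)]
  omega

def gcum (n : Int) : Int :=
  if _h : n ≤ 0 then 0
  else
    let q := PySem.Int.floordiv n 10
    let r := PySem.Int.mod n 10
    10 * gcum q + 45 * q + r * digsum q + PySem.Int.floordiv (r * (r - 1)) 2
termination_by n.toNat
decreasing_by
  rw [PySem.Int.floordiv_eq_ediv_of_pos (by norm_num : (0:Int) < 10)]
  omega

def range_sum_dif_alt (start : Int) (end_ : Int) : Int :=
  let lo := max start 0
  if end_ < lo then 0 else gcum (end_ + 1) - gcum lo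

-- ===== PRECONDITION & SPEC =====
def Spec_range_sum_dif (start : Int) (end_ : Int) (out : Int) : Prop := out = range_sum_dif_alt start end_
instance (start : Int) (end_ : Int) (out : Int) : Decidable (Spec_range_sum_dif start end_ out) := by unfold Spec_range_sum_dif; infer_instance

-- ===== CLAIM (what is proved, stated in full; the proofs are below) =====
def Claim_equal_range_sum_dif : Prop := ∀ (start : Int) (end_ : Int), Dom_range_sum_dif start end_ → Spec_range_sum_dif start end_ (range_sum_dif start end_)

-- ===== LEMMAS AND PROOFS =====

-- ds t = digit sum of t (0 for t ≤ 0), extracted from A's loop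
def ds (t : Int) : Int := dsumLoop 0 t

-- cumulative digit sum over naturals
def S (n : Nat) : Int := ∑ k ∈ Finset.range n, ds (k : Int)

theorem dsumLoop_nonpos (s t : Int) (h : t ≤ 0) : dsumLoop s t = s := by
  rw [dsumLoop]; simp [show ¬ (0 < t) by omega]

theorem dsumLoop_acc (s t : Int) : dsumLoop s t = s + ds t := by
  by_cases h : 0 < t
  · have hlt : (PySem.Int.floordiv t 10).toNat < t.toNat := by
      rw [PySem.Int.floordiv_eq_ediv_of_pos (by norm_num : (0:Int) < 10)]; omega
    unfold ds
    conv_lhs => rw [dsumLoop]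
    conv_rhs => rw [dsumLoop]
    simp only [dif_pos h]
    rw [dsumLoop_acc (s + PySem.Int.mod t 10), dsumLoop_acc (0 + PySem.Int.mod t 10)]
    unfold ds
    ring
  · rw [dsumLoop_nonpos _ _ (by omega)]
    unfold ds; rw [dsumLoop_nonpos _ _ (by omega)]; ring
termination_by t.toNat
decreasing_by all_goals exact hlt

theorem ds_nonpos (t : Int) (h : t ≤ 0) : ds t = 0 := dsumLoop_nonpos 0 t h

theorem ds_pos (t : Int) (h : 0 < t) : ds t = t % 10 + ds (t / 10) := by
  unfold ds
  rw [dsumLoop, dif_pos h, dsumLoop_acc,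
    PySem.Int.floordiv_eq_ediv_of_pos (by norm_num : (0:Int) < 10),
    PySem.Int.mod_eq_emod_of_pos (by norm_num : (0:Int) < 10)]
  unfold ds
  ring

theorem digsum_eq_ds (t : Int) : digsum t = ds t := by
  by_cases h : t ≤ 0
  · rw [digsum, dif_pos h, ds_nonpos t h]
  · rw [digsum, dif_neg h]
    have hlt : (PySem.Int.floordiv t 10).toNat < t.toNat := by
      rw [PySem.Int.floordiv_eq_ediv_of_pos (by norm_num : (0:Int) < 10)]; omega
    rw [digsum_eq_ds (PySem.Int.floordiv t 10), ds_pos t (by omega),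
      PySem.Int.floordiv_eq_ediv_of_pos (by norm_num : (0:Int) < 10),
      PySem.Int.mod_eq_emod_of_pos (by norm_num : (0:Int) < 10)]
termination_by t.toNat

theorem ds_tenq_add (q r : Int) (hq : 0 ≤ q) (hr0 : 0 ≤ r) (hr : r < 10) :
    ds (10 * q + r) = r + ds q := by
  by_cases h : 10 * q + r = 0
  · have hq0 : q = 0 := by omega
    have hr0' : r = 0 := by omega
    simp [hq0, hr0', ds_nonpos 0 (by omega)]
  · rw [ds_pos _ (by omega)]
    have h1 : (10 * q + r) % 10 = r := by omega
    have h2 : (10 * q + r) / 10 = q := by omega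
    rw [h1, h2]

theorem S_succ (n : Nat) : S (n + 1) = S n + ds (n : Int) := by
  unfold S
  rw [Finset.sum_range_succ]

-- Gauss: sum of 0..r-1 as Int
theorem sum_id_range (r : Nat) :
    (∑ j ∈ Finset.range r, (j : Int)) = (r : Int) * ((r : Int) - 1) / 2 := by
  induction r with
  | zero => simp
  | succ r ih =>
    rw [Finset.sum_range_succ, ih]
    have h2 : ∃ a : Int, (r : Int) * ((r : Int) - 1) = 2 * a := by
      rcases Int.even_or_odd (r : Int) with ⟨a, ha⟩ | ⟨a, ha⟩
      · exact ⟨a * ((r : Int) - 1), by rw [ha]; ring⟩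
      · exact ⟨(r : Int) * a, by rw [ha]; ring⟩
    obtain ⟨a, ha⟩ := h2
    have hb : ((r : Nat) + 1 : Int) * (((r : Nat) + 1 : Int) - 1) = 2 * (a + r) := by
      nlinarith [ha]
    push_cast at ha hb ⊢
    omega

theorem S_block (q r : Nat) (hr : r ≤ 10) :
    S (10 * q + r) = S (10 * q) + (r : Int) * ds (q : Int)
      + ∑ j ∈ Finset.range r, (j : Int) := by
  induction r with
  | zero => simp
  | succ r ih =>
    rw [show 10 * q + (r + 1) = (10 * q + r) + 1 by omega, S_succ, ih (by omega)]
    have : ds ((10 * q + r : Nat) : Int) = (r : Int) + ds (q : Int) := by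
      push_cast
      exact ds_tenq_add q r (by positivity) (by positivity) (by exact_mod_cast (by omega : r < 10))
    rw [this, Finset.sum_range_succ]
    push_cast
    ring

theorem S_ten (q : Nat) : S (10 * q) = 10 * S q + 45 * (q : Int) := by
  induction q with
  | zero => simp [S]
  | succ q ih =>
    have : 10 * (q + 1) = 10 * q + 10 := by omega
    rw [this, S_block q 10 (le_refl 10), ih, S_succ]
    have h45 : (∑ j ∈ Finset.range 10, (j : Int)) = 45 := by decide
    rw [h45]
    push_cast
    ring

theorem gcum_eq_S (n : Nat) : gcum (n : Int) = S n := by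
  by_cases h : n = 0
  · simp [h, gcum, S]
  · rw [gcum, dif_neg (by exact_mod_cast (by omega : ¬ (n : Int) ≤ 0))]
    simp only [PySem.Int.floordiv_eq_ediv_of_pos (by norm_num : (0:Int) < 10),
      PySem.Int.mod_eq_emod_of_pos (by norm_num : (0:Int) < 10),
      PySem.Int.floordiv_eq_ediv_of_pos (by norm_num : (0:Int) < 2)]
    have hq : ((n : Int) / 10) = ((n / 10 : Nat) : Int) := by omega
    have hr : ((n : Int) % 10) = ((n % 10 : Nat) : Int) := by omega
    rw [hq, hr, gcum_eq_S (n / 10), digsum_eq_ds]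
    have hn : n = 10 * (n / 10) + n % 10 := by omega
    conv_rhs => rw [hn]
    rw [S_block (n / 10) (n % 10) (by omega), S_ten (n / 10), sum_id_range]
termination_by n

-- G: cumulative digit sum as a function on Int (clamped at 0)
def G (x : Int) : Int := S x.toNat

theorem G_succ (a : Int) : G (a + 1) = G a + ds a := by
  by_cases h : 0 ≤ a
  · have : (a + 1).toNat = a.toNat + 1 := by omega
    unfold G
    rw [this, S_succ]
    congr 1
    congr 1
    omega
  · unfold G
    rw [show (a + 1).toNat = 0 by omega, show a.toNat = 0 by omega, ds_nonpos a (by omega)]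
    ring

theorem sum_ds_pyRange (a b : Int) (h : a ≤ b) :
    ((PySem.List.pyRange a b 1).map ds).sum = G b - G a := by
  by_cases hab : a = b
  · rw [hab, PySem.List.pyRange_one_eq_nil (le_refl b)]; simp
  · have hlt : a < b := by omega
    rw [PySem.List.pyRange_one_cons hlt, List.map_cons, List.sum_cons,
      sum_ds_pyRange (a + 1) b (by omega), G_succ a]
    ring
termination_by (b - a).toNat
decreasing_by omega

-- ===== VERDICT (by name: the statement is the Claim_ definition above) =====
theorem range_sum_dif_spec : Claim_equal_range_sum_dif := by
  intro start end_ _hdom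
  unfold Spec_range_sum_dif range_sum_dif range_sum_dif_alt
  have hfoldl : (PySem.List.pyRange start (end_ + 1) 1).foldl (fun sum i => dsumLoop sum i) 0
      = ((PySem.List.pyRange start (end_ + 1) 1).map ds).sum := by
    have := PySem.List.foldl_add (l := PySem.List.pyRange start (end_ + 1) 1) (g := ds) (a := 0)
    simp only [zero_add] at this
    rw [← this]
    apply PySem.List.foldl_congr_mem
    intro s i _
    exact dsumLoop_acc s i
  rw [hfoldl]
  by_cases hcase : end_ < max start 0
  · simp only [if_pos hcase]
    by_cases hempty : end_ + 1 ≤ start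
    · rw [PySem.List.pyRange_one_eq_nil hempty]; simp
    · -- start ≤ end_ < 0 here
      rw [sum_ds_pyRange start (end_ + 1) (by omega)]
      unfold G
      rw [show (end_ + 1).toNat = 0 by omega, show start.toNat = 0 by omega]
      ring
  · simp only [if_neg hcase]
    -- end_ ≥ max start 0, so end_ ≥ 0 and start ≤ end_
    rw [sum_ds_pyRange start (end_ + 1) (by omega)]
    have h1 : gcum (end_ + 1) = G (end_ + 1) := by
      have := gcum_eq_S (end_ + 1).toNat
      unfold G
      rwa [show (((end_ + 1).toNat : Nat) : Int) = end_ + 1 by omega] at this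
    have h2 : gcum (max start 0) = G start := by
      have := gcum_eq_S (max start 0).toNat
      unfold G
      rwa [show (((max start 0).toNat : Nat) : Int) = max start 0 by omega,
        show (max start 0).toNat = start.toNat by omega] at this
    rw [h1, h2]
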